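-- pv_equiv track=rewrite | github.com/manwar/perlweeklychallenge-club | challenge-329/lubos-kolouch/python/ch-1.py | counter_integers
-- ===== SOURCE A (Python) =====
-- from typing import List
--
-- def counter_integers(text: str) -> List[int]:
--     """Return distinct integers (in order) after removing non-digits."""
--     digits_as_spaces = "".join(ch if ch.isdigit() else " " for ch in text)
--     seen = set()
--     result: List[int] = []
--     for chunk in digits_as_spaces.split():
--         if chunk not in seen:
--             seen.add(chunk)
--             result.append(int(chunk))
--     return result
-- ===== SOURCE B (Python) =====
-- def counter_integers(text):
--     """One-pass scan: accumulate maximal digit runs directly, deduping on the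
--     run string as we go (no intermediate spaces-string, no split)."""
--     seen = set()
--     result = []
--     run = []
--     for ch in text:
--         if '0' <= ch <= '9':
--             run.append(ch)
--         else:
--             if run:
--                 tok = ''.join(run)
--                 if tok not in seen:
--                     seen.add(tok)
--                     result.append(int(tok))
--                 run = []
--     if run:
--         tok = ''.join(run)
--         if tok not in seen:
--             seen.add(tok)
--             result.append(int(tok))
--     return result
-- ===== Notes on version B (the rewrite author's own statement) =====
-- stated objective: simpler
-- what changed: Replaces A's build-a-spaces-string-then-split two-phase pipeline with a single left-to-right scan that accumulates each maximal digit run and dedups/emits it in the same pass.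
import Mathlib
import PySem

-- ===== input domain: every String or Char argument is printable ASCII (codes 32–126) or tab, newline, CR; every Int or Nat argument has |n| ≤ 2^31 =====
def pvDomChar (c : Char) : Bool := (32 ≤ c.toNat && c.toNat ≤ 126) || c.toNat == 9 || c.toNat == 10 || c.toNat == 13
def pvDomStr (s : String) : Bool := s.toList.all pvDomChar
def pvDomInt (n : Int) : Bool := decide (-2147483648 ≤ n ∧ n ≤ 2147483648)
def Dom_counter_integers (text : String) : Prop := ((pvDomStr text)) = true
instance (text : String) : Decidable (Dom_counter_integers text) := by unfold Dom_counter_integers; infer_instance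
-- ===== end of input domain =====

-- B replaces A's map-to-spaces + split() + dedupe loop by one direct scan over the
-- characters that accumulates each maximal digit run and dedups/emits it inline (simpler, same cost).

-- ===== PORT A =====
-- ch.isdigit() else ' '  (exact on the ASCII domain)
def pvDigitify (ch : Char) : Char := if PySem.Chars.isdigit ch then ch else ' '

-- loop body: if chunk not in seen: seen.add(chunk); result.append(int(chunk))
-- int(chunk) never raises here (chunk is a nonempty digit run); .getD 0 is the total form.
def pvAStep (st : PySem.Set String × List Int) (chunk : String) : PySem.Set String × List Int :=
  if PySem.Set.contains st.1 chunk then st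
  else (PySem.Set.add st.1 chunk, st.2 ++ [(PySem.Int.ofStr? chunk).getD 0])

def counter_integers (text : String) : List Int :=
  let digits_as_spaces := String.ofList (text.toList.map pvDigitify)
  ((PySem.Str.split₀ digits_as_spaces).foldl pvAStep (PySem.Set.empty, [])).2

-- ===== PORT B =====
-- flush the current run: dedupe on the run string, append int(tok) on first sight, clear the run
def pvBFlush (st : PySem.Set String × List Int × List Char) :
    PySem.Set String × List Int × List Char :=
  let tok := String.ofList st.2.2
  if PySem.Set.contains st.1 tok then (st.1, st.2.1, [])
  else (PySem.Set.add st.1 tok, st.2.1 ++ [(PySem.Int.ofStr? tok).getD 0], [])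

def pvBStep (st : PySem.Set String × List Int × List Char) (ch : Char) :
    PySem.Set String × List Int × List Char :=
  if '0' ≤ ch ∧ ch ≤ '9' then (st.1, st.2.1, st.2.2 ++ [ch])
  else if st.2.2.isEmpty then st else pvBFlush st

def counter_integers_alt (text : String) : List Int :=
  let st := text.toList.foldl pvBStep (PySem.Set.empty, [], [])
  if st.2.2.isEmpty then st.2.1 else (pvBFlush st).2.1

-- ===== PRECONDITION & SPEC =====
def Spec_counter_integers (text : String) (out : List Int) : Prop := out = counter_integers_alt text
instance (text : String) (out : List Int) : Decidable (Spec_counter_integers text out) := by unfold Spec_counter_integers; infer_instance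

-- ===== CLAIM (what is proved, stated in full; the proofs are below) =====
def Claim_equal_counter_integers : Prop := ∀ (text : String), Dom_counter_integers text → Spec_counter_integers text (counter_integers text)

-- ===== LEMMAS AND PROOFS =====

-- A's dedupe fold over a token list (tokens as char lists)
def pvAFold (ts : List (List Char)) (p : PySem.Set String × List Int) :
    PySem.Set String × List Int :=
  ts.foldl (fun p t => pvAStep p (String.ofList t)) p

theorem pv_go_acc (cs : List Char) : ∀ (cur : List Char) (acc : List (List Char)),
    PySem.Chars.split₀.go cs cur acc = acc.reverse ++ PySem.Chars.split₀.go cs cur [] := by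
  induction cs with
  | nil => intro cur acc; simp [PySem.Chars.split₀.go]; split <;> simp
  | cons c rest ih =>
      intro cur acc
      simp only [PySem.Chars.split₀.go]
      split
      · split
        · exact ih [] acc
        · rw [ih [] (cur.reverse :: acc), ih [] [cur.reverse]]; simp
      · exact ih (c :: cur) acc

theorem pv_isspace_digit (c : Char) (h1 : '0' ≤ c) (h2 : c ≤ '9') :
    PySem.Chars.isspace c = false := by
  have h1' : 48 ≤ c.toNat := h1
  have h2' : c.toNat ≤ 57 := h2
  simp only [PySem.Chars.isspace]
  simp only [Bool.or_eq_false_iff, Bool.and_eq_false_iff, decide_eq_false_iff_not]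
  omega

theorem pv_flush_eq (s : PySem.Set String) (r : List Int) (run : List Char) :
    pvBFlush (s, r, run) =
      ((pvAStep (s, r) (String.ofList run)).1, (pvAStep (s, r) (String.ofList run)).2, []) := by
  simp only [pvBFlush, pvAStep]; split <;> rfl

theorem pv_key (cs : List Char) : ∀ (seen : PySem.Set String) (result : List Int) (run : List Char),
    (let st := cs.foldl pvBStep (seen, result, run);
     if st.2.2.isEmpty then st.2.1 else (pvBFlush st).2.1)
    = (pvAFold (PySem.Chars.split₀.go (cs.map pvDigitify) run.reverse []) (seen, result)).2 := by
  induction cs with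
  | nil =>
      intro seen result run
      simp only [List.map_nil, List.foldl_nil, PySem.Chars.split₀.go]
      cases run with
      | nil => simp [pvAFold]
      | cons a as =>
          simp only [List.isEmpty_cons, List.reverse_reverse, pvAFold,
            List.isEmpty_eq_false_iff, List.reverse_eq_nil_iff]
          simp [pv_flush_eq]
  | cons c rest ih =>
      intro seen result run
      by_cases hd : '0' ≤ c ∧ c ≤ '9'
      · have hdig : PySem.Chars.isdigit c = true := by
          simp [PySem.Chars.isdigit, hd.1, hd.2]
        have hsp : PySem.Chars.isspace c = false := pv_isspace_digit c hd.1 hd.2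
        simp only [List.map_cons, List.foldl_cons, pvDigitify, hdig, if_true,
          PySem.Chars.split₀.go, hsp, Bool.false_eq_true, if_false, pvBStep, hd]
        have : c :: run.reverse = (run ++ [c]).reverse := by simp
        rw [this]
        exact ih seen result (run ++ [c])
      · have hdig : PySem.Chars.isdigit c = false := by
          simp only [PySem.Chars.isdigit, Bool.and_eq_false_iff, decide_eq_false_iff_not]
          tauto
        have hsp : PySem.Chars.isspace ' ' = true := by decide
        simp only [List.map_cons, List.foldl_cons, pvDigitify, hdig, Bool.false_eq_true,
          if_false, PySem.Chars.split₀.go, hsp, if_true, pvBStep, hd]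
        cases run with
        | nil => simpa using ih seen result []
        | cons a as =>
            have hne : (as.reverse ++ [a]).isEmpty = false := by simp
            simp only [List.isEmpty_cons, List.reverse_cons, List.reverse_reverse,
              Bool.false_eq_true, if_false, hne]
            rw [show (as.reverse ++ [a]).reverse = a :: as from by simp]
            rw [pv_go_acc _ [] [a :: as]]
            simp only [List.reverse_cons, List.reverse_nil, List.nil_append,
              List.singleton_append, pvAFold, List.foldl_cons]
            rw [pv_flush_eq]
            exact ih _ _ []

-- ===== VERDICT (by name: the statement is the Claim_ definition above) =====
theorem counter_integers_spec : Claim_equal_counter_integers := by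
  intro text _
  unfold Spec_counter_integers counter_integers counter_integers_alt
  simp only [PySem.Str.split₀]
  simp only [String.toList_ofList, List.foldl_map]
  have := pv_key text.toList PySem.Set.empty [] []
  simpa [pvAFold, PySem.Chars.split₀] using this.symm
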